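-- pv_equiv track=rewrite | github.com/SauravSinha76/scaler2 | class31/diff_bit_pair.py | solve
-- ===== SOURCE A (Python) =====
-- def solve(A):
--     ans =0
--     n = len(A)
--     for i in range(32):
--         count = 0
--         for a in A:
--             if a & 1 << i:
--                 count += 1
--
--         ans += (count *( n- count) * 2)
--     return ans
-- ===== SOURCE B (Python) =====
-- def solve(A):
--     ans = 0
--     for x in A:
--         for y in A:
--             ans += ((x ^ y) & 0xFFFFFFFF).bit_count()
--     return ans
-- ===== Notes on version B (the rewrite author's own statement) =====
-- stated objective: alternative
-- what changed: Replaces A's per-bit counting (32 passes, closed-form count*(n-count)*2 per bit) by directly summing the 32-bit popcount of (x ^ y) & 0xFFFFFFFF over all ordered element pairs.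
import Mathlib
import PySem

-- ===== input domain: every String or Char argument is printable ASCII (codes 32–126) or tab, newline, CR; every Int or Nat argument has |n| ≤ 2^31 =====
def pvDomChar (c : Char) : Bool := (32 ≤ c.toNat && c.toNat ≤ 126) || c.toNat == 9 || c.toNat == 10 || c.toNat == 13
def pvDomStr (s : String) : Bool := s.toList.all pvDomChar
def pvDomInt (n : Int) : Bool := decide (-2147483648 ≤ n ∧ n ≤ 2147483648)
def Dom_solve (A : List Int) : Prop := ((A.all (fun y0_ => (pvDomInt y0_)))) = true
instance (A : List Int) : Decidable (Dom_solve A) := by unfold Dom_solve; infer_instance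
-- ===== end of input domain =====

-- B replaces A's per-bit counting (32 passes, count*(n-count)*2 per bit) by summing the
-- 32-bit popcount of (x ^ y) & 0xFFFFFFFF over all ordered element pairs (alternative algorithm, not faster).


-- ===== PORT A =====
def solve (A : List Int) : Int :=
  let n : Int := (A.length : Int)
  (PySem.List.pyRange 0 32).foldl (fun ans i =>
    let count : Int := A.foldl (fun count a =>
      if PySem.Int.band a ((1 : Int) <<< i.toNat) ≠ 0 then count + 1 else count) 0
    ans + count * (n - count) * 2) 0

-- ===== PORT B =====
def solve_alt (A : List Int) : Int :=
  A.foldl (fun ans x =>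
    A.foldl (fun ans y =>
      ans + (PySem.Int.bitCount (PySem.Int.band (PySem.Int.bxor x y) 0xFFFFFFFF) : Int)) ans) 0

-- ===== PRECONDITION & SPEC =====
def Spec_solve (A : List Int) (out : Int) : Prop := out = solve_alt A
instance (A : List Int) (out : Int) : Decidable (Spec_solve A out) := by unfold Spec_solve; infer_instance

-- ===== CLAIM (what is proved, stated in full; the proofs are below) =====
def Claim_equal_solve : Prop := ∀ (A : List Int), Dom_solve A → Spec_solve A (solve A)

-- ===== LEMMAS AND PROOFS =====

-- Int.testBit through the two sign cases
lemma testBit_nonneg (a : Int) (h : 0 ≤ a) (k : Nat) : a.testBit k = a.toNat.testBit k := by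
  rcases a with m | m
  · rfl
  · exact absurd h (by simp)

lemma testBit_neg (a : Int) (h : a < 0) (k : Nat) : a.testBit k = !((-a - 1).toNat.testBit k) := by
  rcases a with m | m
  · exact absurd h (Int.not_lt.mpr (Int.natCast_nonneg m))
  · show (!m.testBit k) = _
    congr 2
    simp [Int.negSucc_eq]

lemma one_shl (k : Nat) : (1 : Int) <<< k = ((2 ^ k : Nat) : Int) := by
  simp [Int.shiftLeft_eq]

-- A's loop condition `a & (1 << k)` is nonzero exactly when bit k of a is set
lemma band_two_pow_ne (a : Int) (k : Nat) :
    (PySem.Int.band a ((1 : Int) <<< k) ≠ 0) ↔ a.testBit k = true := by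
  rw [one_shl]
  unfold PySem.Int.band
  by_cases ha : 0 ≤ a
  · rw [if_pos ha, if_pos (by positivity : (0:Int) ≤ ((2^k : Nat) : Int))]
    rw [Int.toNat_natCast, Nat.and_two_pow, testBit_nonneg a ha]
    cases h : a.toNat.testBit k <;> simp
  · rw [if_neg ha, if_pos (by positivity : (0:Int) ≤ ((2^k : Nat) : Int))]
    rw [Int.toNat_natCast, Nat.two_pow_and, testBit_neg a (by omega)]
    cases h : (-a - 1).toNat.testBit k <;> simp

lemma neg_form_testBit (u : Nat) (k : Nat) : (-(u:Int) - 1).testBit k = !u.testBit k := by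
  rw [testBit_neg _ (by omega)]
  congr 2
  omega

-- PySem xor has Python's two's-complement bits
lemma bxor_testBit (x y : Int) (k : Nat) :
    (PySem.Int.bxor x y).testBit k = (x.testBit k ^^ y.testBit k) := by
  unfold PySem.Int.bxor
  by_cases hx : 0 ≤ x <;> by_cases hy : 0 ≤ y <;> simp only [hx, hy, if_pos, if_false]
  · rw [testBit_nonneg _ (by positivity), Int.toNat_natCast, Nat.testBit_xor,
      testBit_nonneg x hx, testBit_nonneg y hy]
  · rw [neg_form_testBit, Nat.testBit_xor, testBit_nonneg x hx, testBit_neg y (by omega)]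
    cases x.toNat.testBit k <;> cases (-y - 1).toNat.testBit k <;> rfl
  · rw [neg_form_testBit, Nat.testBit_xor, testBit_neg x (by omega), testBit_nonneg y hy]
    cases (-x - 1).toNat.testBit k <;> cases y.toNat.testBit k <;> rfl
  · rw [testBit_nonneg _ (by positivity), Int.toNat_natCast, Nat.testBit_xor,
      testBit_neg x (by omega), testBit_neg y (by omega)]
    cases (-x - 1).toNat.testBit k <;> cases (-y - 1).toNat.testBit k <;> rfl

-- masking with 0xFFFFFFFF: the result as a Nat, its bound, its bits
def maskNat (z : Int) : Nat := (PySem.Int.band z 0xFFFFFFFF).toNat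

lemma band_mask_eq (z : Int) : PySem.Int.band z 0xFFFFFFFF = (maskNat z : Int) := by
  unfold maskNat
  rw [Int.toNat_of_nonneg]
  rw [PySem.Int.band_comm]
  exact PySem.Int.band_nonneg_of_nonneg_left z (by norm_num)

lemma maskNat_le (z : Int) : maskNat z ≤ 2 ^ 32 - 1 := by
  unfold maskNat PySem.Int.band
  by_cases hz : 0 ≤ z
  · rw [if_pos hz, if_pos (by norm_num : (0:Int) ≤ 0xFFFFFFFF), Int.toNat_natCast]
    exact le_trans Nat.and_le_right (by norm_num)
  · rw [if_neg hz, if_pos (by norm_num : (0:Int) ≤ 0xFFFFFFFF), Int.toNat_natCast]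
    exact le_trans (Nat.sub_le _ _) (by norm_num)

lemma maskNat_testBit (z : Int) (k : Nat) :
    (maskNat z).testBit k = (z.testBit k && decide (k < 32)) := by
  unfold maskNat PySem.Int.band
  by_cases hz : 0 ≤ z
  · rw [if_pos hz, if_pos (by norm_num : (0:Int) ≤ 0xFFFFFFFF), Int.toNat_natCast]
    rw [show ((0xFFFFFFFF:Int).toNat) = 2 ^ 32 - 1 from rfl]
    rw [Nat.testBit_land, Nat.testBit_two_pow_sub_one, testBit_nonneg z hz]
  · rw [if_neg hz, if_pos (by norm_num : (0:Int) ≤ 0xFFFFFFFF), Int.toNat_natCast]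
    rw [show ((0xFFFFFFFF:Int).toNat) = 2 ^ 32 - 1 from rfl]
    have hlt : (2 ^ 32 - 1) &&& (-z - 1).toNat < 2 ^ 32 :=
      lt_of_le_of_lt Nat.and_le_left (by norm_num)
    rw [show (2:Nat) ^ 32 - 1 - ((2 ^ 32 - 1) &&& (-z - 1).toNat)
          = 2 ^ 32 - (((2 ^ 32 - 1) &&& (-z - 1).toNat) + 1) from by omega]
    rw [Nat.testBit_two_pow_sub_succ hlt, Nat.testBit_land, Nat.testBit_two_pow_sub_one,
      testBit_neg z (by omega)]
    by_cases hk : k < 32 <;> cases h : (-z - 1).toNat.testBit k <;> simp [hk, h]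

-- popcount of a Nat below 2^k is the sum of its first k bits
lemma bitCount_eq_sum (k : Nat) : ∀ m : Nat, m < 2 ^ k →
    (PySem.Int.bitCount (m : Int) : Int)
      = ((List.range k).map (fun i => if m.testBit i then (1 : Int) else 0)).sum := by
  induction k with
  | zero =>
    intro m hm
    interval_cases m
    simp [PySem.Int.bitCount_zero]
  | succ k ih =>
    intro m hm
    by_cases h0 : m = 0
    · subst h0
      simp [PySem.Int.bitCount_zero, Nat.zero_testBit]
    · rw [PySem.Int.bitCount_natCast (Nat.pos_of_ne_zero h0)]
      rw [Nat.cast_add, ih (m / 2) (by omega)]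
      rw [List.range_succ_eq_map, List.map_cons, List.sum_cons, List.map_map]
      have hhead : (if m.testBit 0 then (1:Int) else 0) = ((m % 2 : Nat) : Int) := by
        rcases Nat.mod_two_eq_zero_or_one m with h | h <;> simp [Nat.testBit_zero, h]
      have htail : ∀ i : Nat, ((fun i => if m.testBit i then (1:Int) else 0) ∘ Nat.succ) i
          = (fun i => if (m / 2).testBit i then (1:Int) else 0) i := by
        intro i
        simp [Function.comp, Nat.succ_eq_add_one, Nat.testBit_add_one]
      rw [List.map_congr_left (fun i _ => htail i), hhead]

-- the value B adds for one ordered pair: one per bit position where x and y differ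
lemma pair_eq (x y : Int) :
    (PySem.Int.bitCount (PySem.Int.band (PySem.Int.bxor x y) 0xFFFFFFFF) : Int)
      = ((List.range 32).map
          (fun k => if x.testBit k ≠ y.testBit k then (1 : Int) else 0)).sum := by
  rw [band_mask_eq, bitCount_eq_sum 32 _ (by have := maskNat_le (PySem.Int.bxor x y); omega)]
  refine congrArg List.sum (List.map_congr_left ?_)
  intro k hk
  rw [List.mem_range] at hk
  rw [maskNat_testBit, bxor_testBit]
  simp only [hk, decide_true, Bool.and_true]
  cases hx : x.testBit k <;> cases hy : y.testBit k <;> simp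

-- A's inner loop counts the elements with bit k set
lemma A_inner (k : Nat) (A : List Int) : ∀ a0 : Int,
    A.foldl (fun count a =>
      if PySem.Int.band a ((1 : Int) <<< k) ≠ 0 then count + 1 else count) a0
      = a0 + (A.countP (fun a => a.testBit k) : Int) := by
  induction A with
  | nil => intro a0; simp
  | cons a A ih =>
    intro a0
    rw [List.foldl_cons, List.countP_cons]
    by_cases h : PySem.Int.band a ((1 : Int) <<< k) ≠ 0
    · rw [if_pos h, ih]
      have := (band_two_pow_ne a k).mp h
      simp [this]
      push_cast
      ring
    · rw [if_neg h, ih]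
      have : a.testBit k = false := by
        rcases Bool.eq_false_or_eq_true (a.testBit k) with hb | hb
        · exact absurd ((band_two_pow_ne a k).mpr hb) h
        · exact hb
      simp [this]

-- exchange a sum over a list with a sum over an index list
lemma sum_swap_list {α β : Type} (A : List α) (K : List β) (f : α → β → Int) :
    (A.map (fun x => (K.map (fun k => f x k)).sum)).sum
      = (K.map (fun k => (A.map (fun x => f x k)).sum)).sum := by
  induction A with
  | nil => simp
  | cons x A ih =>
    simp only [List.map_cons, List.sum_cons, ih, ← PySem.List.sum_map_add_int]

lemma inner_count (p : Int → Bool) (b : Bool) (A : List Int) :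
    ((A.map (fun y => if b ≠ p y then (1 : Int) else 0)).sum)
      = if b then (A.length : Int) - (A.countP p : Int) else (A.countP p : Int) := by
  induction A with
  | nil => cases b <;> simp
  | cons y A ih =>
    simp only [List.map_cons, List.sum_cons, ih, List.countP_cons, List.length_cons]
    cases b <;> cases hpy : p y <;> simp <;> push_cast <;> ring

lemma outer_sum (p : Int → Bool) (u v : Int) (A : List Int) :
    ((A.map (fun x => if p x then u else v)).sum)
      = (A.countP p : Int) * u + ((A.length : Int) - (A.countP p : Int)) * v := by
  induction A with
  | nil => simp
  | cons x A ih =>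
    simp only [List.map_cons, List.sum_cons, ih, List.countP_cons, List.length_cons]
    cases hpx : p x <;> simp <;> push_cast <;> ring

-- for one bit: the ordered pairs that differ there number 2 * c * (n - c)
lemma count_pairs (p : Int → Bool) (A : List Int) :
    ((A.map (fun x => ((A.map (fun y => if p x ≠ p y then (1 : Int) else 0)).sum))).sum)
      = (A.countP p : Int) * ((A.length : Int) - (A.countP p : Int)) * 2 := by
  simp only [inner_count p]
  rw [outer_sum]
  ring

-- ===== VERDICT (by name: the statement is the Claim_ definition above) =====
theorem solve_spec : Claim_equal_solve := by
  intro A _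
  unfold Spec_solve solve solve_alt
  rw [show (32:Int) = ((32:Nat):Int) from rfl, PySem.List.pyRange_zero_natCast,
    List.foldl_map]
  have h2 : ∀ k : Nat, A.foldl (fun count a =>
      if PySem.Int.band a ((1 : Int) <<< ((((k:Int)).toNat : Nat) : Int)) ≠ 0 then count + 1 else count) (0:Int)
      = (A.countP (fun a => a.testBit k) : Int) := by
    intro k
    simp only [Int.toNat_natCast, Int.shiftLeft_natCast_right]
    rw [A_inner k A 0, zero_add]
  simp only [h2, PySem.List.foldl_add, pair_eq]
  have h1 : ∀ x : Int, ((A.map (fun y => ((List.range 32).map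
        (fun k => if x.testBit k ≠ y.testBit k then (1:Int) else 0)).sum)).sum)
      = (((List.range 32).map (fun k => (A.map
        (fun y => if x.testBit k ≠ y.testBit k then (1:Int) else 0)).sum)).sum) :=
    fun x => sum_swap_list A (List.range 32) _
  simp only [h1]
  rw [sum_swap_list A (List.range 32)
    (fun x k => (A.map (fun y => if x.testBit k ≠ y.testBit k then (1:Int) else 0)).sum)]
  simp only [count_pairs (fun a => a.testBit _) A]
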